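-- pv_equiv track=rewrite | github.com/Danielaleite/ORC-Nextrout | code/processing_syn_results.py | relabel_comm
-- ===== SOURCE A (Python) =====
-- def relabel_comm(com_dict):
--     com_dict = dict(com_dict)
--     comm_list = list(com_dict.values())
--     label2int = {}
--     comm_list = list(set(comm_list))
--     comm_list.sort()
--     for idx, lab in enumerate(comm_list):
--         label2int[lab] = idx
--     com_dict_new = {}
--     for node in com_dict.keys():
--         com_dict_new[node] = label2int[com_dict[node]]
--     return com_dict_new
-- ===== SOURCE B (Python) =====
-- def relabel_comm(com_dict):
--     com_dict = dict(com_dict)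
--     distinct = set(com_dict.values())
--     return {node: sum(1 for u in distinct if u < v) for node, v in com_dict.items()}
-- ===== Notes on version B (the rewrite author's own statement) =====
-- stated objective: alternative
-- what changed: B drops the sort and the label2int table entirely: each node's new label is computed directly as the number of distinct community values strictly smaller than its own, via a counting comprehension over the value set.
import Mathlib
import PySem

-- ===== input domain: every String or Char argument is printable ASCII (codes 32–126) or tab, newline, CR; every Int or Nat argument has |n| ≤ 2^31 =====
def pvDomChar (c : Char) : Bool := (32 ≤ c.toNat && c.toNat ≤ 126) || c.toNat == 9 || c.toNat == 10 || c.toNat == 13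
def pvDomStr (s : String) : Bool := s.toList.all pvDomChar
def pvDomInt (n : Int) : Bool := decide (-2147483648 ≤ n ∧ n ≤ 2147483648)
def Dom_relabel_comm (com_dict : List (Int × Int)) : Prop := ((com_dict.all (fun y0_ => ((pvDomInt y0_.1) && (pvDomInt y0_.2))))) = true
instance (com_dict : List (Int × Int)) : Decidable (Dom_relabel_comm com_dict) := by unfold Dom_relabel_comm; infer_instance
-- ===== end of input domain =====

-- B replaces the sort + label2int table by a direct count: each node's label is the
-- number of distinct community values strictly below its own (objective: alternative).

-- ===== PORT A =====
def relabel_comm (com_dict : List (Int × Int)) : List (Int × Int) :=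
  let d := PySem.Dict.ofList com_dict              -- com_dict = dict(com_dict)
  let comm_list := d.values                        -- comm_list = list(com_dict.values())
  let comm_list := PySem.Set.ofList comm_list      -- comm_list = list(set(comm_list))
  let comm_list := PySem.List.sorted comm_list (fun x => x) false   -- comm_list.sort()
  -- for idx, lab in enumerate(comm_list): label2int[lab] = idx
  let label2int := (PySem.List.enumerate comm_list 0).foldl
      (fun t p => t.insert p.2 p.1) (PySem.Dict.empty : PySem.Dict Int Int)
  -- for node in com_dict.keys(): com_dict_new[node] = label2int[com_dict[node]]
  -- both lookups are on keys that are always present, so getD is exact (no KeyError path)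
  let com_dict_new := d.keys.foldl
      (fun t node => t.insert node (label2int.getD (d.getD node 0) 0))
      (PySem.Dict.empty : PySem.Dict Int Int)
  com_dict_new.items

-- ===== PORT B =====
def relabel_comm_alt (com_dict : List (Int × Int)) : List (Int × Int) :=
  let d := PySem.Dict.ofList com_dict              -- com_dict = dict(com_dict)
  let distinct := PySem.Set.ofList d.values        -- distinct = set(com_dict.values())
  -- dict comprehension over d.items: keys are distinct, so it appends in order = map
  d.items.map (fun p => (p.1, ((distinct.filter (fun u => decide (u < p.2))).length : Int)))

-- ===== PRECONDITION & SPEC =====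
def Spec_relabel_comm (com_dict : List (Int × Int)) (out : List (Int × Int)) : Prop := out = relabel_comm_alt com_dict
instance (com_dict : List (Int × Int)) (out : List (Int × Int)) : Decidable (Spec_relabel_comm com_dict out) := by unfold Spec_relabel_comm; infer_instance

-- ===== CLAIM (what is proved, stated in full; the proofs are below) =====
def Claim_equal_relabel_comm : Prop := ∀ (com_dict : List (Int × Int)), Dom_relabel_comm com_dict → Spec_relabel_comm com_dict (relabel_comm com_dict)

-- ===== LEMMAS AND PROOFS =====

-- In a strictly increasing list, the number of elements below L[i] is i.
theorem count_lt_of_pairwise (L : List Int) (i : Nat) (hi : i < L.length)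
    (hp : L.Pairwise (· < ·)) :
    (L.filter (fun u => decide (u < L[i]))).length = i := by
  have hg : ∀ (j k : Nat) (hj : j < L.length) (hk : k < L.length), j < k → L[j] < L[k] := by
    intro j k hj hk hjk
    exact (List.pairwise_iff_getElem.mp hp) j k hj hk hjk
  rw [← List.countP_eq_length_filter]
  obtain ⟨v, hv⟩ : ∃ v, L[i] = v := ⟨_, rfl⟩
  rw [hv]
  have hsplit : List.countP (fun u => decide (u < v)) L
      = (L.take i).countP (fun u => decide (u < v)) + (L.drop i).countP (fun u => decide (u < v)) := by
    conv_lhs => rw [← List.take_append_drop i L]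
    rw [List.countP_append]
  rw [hsplit]
  have h1 : (L.take i).countP (fun u => decide (u < v)) = i := by
    have hall : ∀ x ∈ L.take i, (fun u => decide (u < v)) x = true := by
      intro x hx
      obtain ⟨j, hj, hxe⟩ := List.mem_take_iff_getElem.mp hx
      have hj' : j < i := lt_of_lt_of_le hj (min_le_left _ _)
      have := hg j i (lt_of_lt_of_le hj' (le_of_lt hi)) hi hj'
      rw [hv] at this
      simp [← hxe, this]
    rw [List.countP_eq_length.mpr hall, List.length_take]
    omega
  have h2 : (L.drop i).countP (fun u => decide (u < v)) = 0 := by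
    rw [List.countP_eq_zero]
    intro x hx
    obtain ⟨j, hj, hxe⟩ := List.mem_drop_iff_getElem.mp hx
    have hle : v ≤ L[i + j] := by
      rcases Nat.eq_zero_or_pos j with h0 | h0
      · subst h0; simp [← hv]
      · have h' := hg i (i + j) hi (by omega) (by omega)
        rw [hv] at h'
        exact le_of_lt h'
    simp only [← hxe, decide_eq_true_eq]
    omega
  omega

-- A's table lookup at a value v present among vs equals B's count of smaller distinct values.
theorem lookup_eq_count (vs : List Int) (v : Int) (hv : v ∈ PySem.Set.ofList vs) :
    (((PySem.List.enumerate (PySem.List.sorted (PySem.Set.ofList vs) (fun x => x) false) 0).foldl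
        (fun t p => t.insert p.2 p.1) (PySem.Dict.empty : PySem.Dict Int Int)).getD v 0)
    = (((PySem.Set.ofList vs).filter (fun u => decide (u < v))).length : Int) := by
  set s := PySem.Set.ofList vs with hs
  set L := PySem.List.sorted s (fun x => x) false with hL
  have hperm : L.Perm s := PySem.List.sorted_perm ..
  have hnodupL : L.Nodup := hperm.nodup_iff.mpr (PySem.Set.nodup_ofList vs)
  have hpair : L.Pairwise (· < ·) := PySem.List.sorted_ofList_pairwise_lt ..
  have hvL : v ∈ L := (PySem.List.mem_sorted ..).mpr hv
  obtain ⟨i, hi, hvi⟩ := List.getElem_of_mem hvL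
  set T := (PySem.List.enumerate L 0).foldl (fun t p => t.insert p.2 p.1)
      (PySem.Dict.empty : PySem.Dict Int Int) with hT
  have hitems : T.items = (PySem.List.enumerate L 0).map (fun a => (a.2, a.1)) := by
    have := PySem.Dict.items_foldl_insert_fresh (l := PySem.List.enumerate L 0)
      (k := fun a => a.2) (v := fun a => a.1) (d := (PySem.Dict.empty : PySem.Dict Int Int))
      (by intro a _; exact PySem.Dict.contains_empty ..)
      (by rw [PySem.List.map_snd_enumerate]; exact hnodupL)
    simpa using this
  have hkeysnd : T.keys.Nodup := by
    have hkeys : T.keys = L := by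
      simp only [PySem.Dict.keys, hitems, List.map_map]
      exact PySem.List.map_snd_enumerate ..
    rw [hkeys]; exact hnodupL
  have hmem : (v, (i : Int)) ∈ T.items := by
    rw [hitems]
    have : ((0 : Int) + (i : Nat), L[i]) ∈ PySem.List.enumerate L 0 := by
      exact (PySem.List.mem_enumerate_iff ..).mpr ⟨i, hi, rfl⟩
    have h2 := List.mem_map_of_mem (f := fun a => (a.2, a.1)) this
    simpa [hvi] using h2
  have hget : T.getD v 0 = (i : Int) := PySem.Dict.getD_of_mem_items T hmem hkeysnd 0
  rw [hget]
  have hfl : (L.filter (fun u => decide (u < v))).length = i := by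
    rw [← hvi]; exact count_lt_of_pairwise L i hi hpair
  have hfp : (s.filter (fun u => decide (u < v))).length
      = (L.filter (fun u => decide (u < v))).length :=
    (List.Perm.length_eq (List.Perm.filter _ hperm)).symm
  rw [hfp, hfl]

-- ===== VERDICT (by name: the statement is the Claim_ definition above) =====
theorem relabel_comm_spec : Claim_equal_relabel_comm := by
  intro com_dict _
  unfold Spec_relabel_comm relabel_comm relabel_comm_alt
  set d := PySem.Dict.ofList com_dict with hd
  have hnd : d.keys.Nodup := PySem.Dict.nodup_keys_ofList ..
  -- A's result list
  have hA : (d.keys.foldl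
      (fun t node => t.insert node
        (((PySem.List.enumerate (PySem.List.sorted (PySem.Set.ofList d.values) (fun x => x) false) 0).foldl
          (fun t p => t.insert p.2 p.1) (PySem.Dict.empty : PySem.Dict Int Int)).getD (d.getD node 0) 0))
      (PySem.Dict.empty : PySem.Dict Int Int)).items
      = d.keys.map (fun node => (node,
        ((PySem.List.enumerate (PySem.List.sorted (PySem.Set.ofList d.values) (fun x => x) false) 0).foldl
          (fun t p => t.insert p.2 p.1) (PySem.Dict.empty : PySem.Dict Int Int)).getD (d.getD node 0) 0)) := by
    have := PySem.Dict.items_foldl_insert_fresh (l := d.keys)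
      (k := fun node => node)
      (v := fun node =>
        ((PySem.List.enumerate (PySem.List.sorted (PySem.Set.ofList d.values) (fun x => x) false) 0).foldl
          (fun t p => t.insert p.2 p.1) (PySem.Dict.empty : PySem.Dict Int Int)).getD (d.getD node 0) 0)
      (d := (PySem.Dict.empty : PySem.Dict Int Int))
      (by intro a _; exact PySem.Dict.contains_empty ..)
      (by simpa using hnd)
    simpa using this
  have hB : d.items = d.keys.map (fun k => (k, d.getD k 0)) :=
    PySem.Dict.items_eq_map_keys d hnd 0
  simp only [hA, hB, List.map_map]
  apply List.map_congr_left
  intro node hnode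
  have hvmem : d.getD node 0 ∈ PySem.Set.ofList d.values := by
    apply (PySem.Set.mem_ofList ..).mpr
    have : d.values = d.keys.map (fun k => d.getD k 0) := PySem.Dict.values_eq_map_keys d hnd 0
    rw [this]
    exact List.mem_map_of_mem hnode
  have := lookup_eq_count d.values (d.getD node 0) hvmem
  simp [Function.comp, this]
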